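-- pv_equiv track=rewrite | github.com/navilai/navil | navil/api/local/routes.py | _sse_event
-- ===== SOURCE A (Python) =====
-- def _sse_event(data: str, event: str | None = None) -> str:
--     """Format a single SSE event."""
--     lines = []
--     if event:
--         lines.append(f"event: {event}")
--     # SSE spec: multi-line data needs each line prefixed with "data: "
--     for line in data.split("\n"):
--         lines.append(f"data: {line}")
--     lines.append("")  # trailing blank line = event boundary
--     lines.append("")
--     return "\n".join(lines)
-- ===== SOURCE B (Python) =====
-- def _sse_event(data: str, event: str | None = None) -> str:
--     """Format a single SSE event."""
--     out = []
--     if event: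
--         out.append("event: ")
--         out.append(event)
--         out.append("\n")
--     out.append("data: ")
--     for ch in data:
--         out.append(ch)
--         if ch == "\n":
--             out.append("data: ")
--     out.append("\n\n")
--     return "".join(out)
-- ===== Notes on version B (the rewrite author's own statement) =====
-- stated objective: alternative
-- what changed: Replaces A's line-level strategy (split data into lines, build a list of prefixed lines, join with newlines) by a single character-level scan that streams each character and emits the 'data: ' prefix inline right after every newline; no splitting or per-line list is ever built.
import Mathlib
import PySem

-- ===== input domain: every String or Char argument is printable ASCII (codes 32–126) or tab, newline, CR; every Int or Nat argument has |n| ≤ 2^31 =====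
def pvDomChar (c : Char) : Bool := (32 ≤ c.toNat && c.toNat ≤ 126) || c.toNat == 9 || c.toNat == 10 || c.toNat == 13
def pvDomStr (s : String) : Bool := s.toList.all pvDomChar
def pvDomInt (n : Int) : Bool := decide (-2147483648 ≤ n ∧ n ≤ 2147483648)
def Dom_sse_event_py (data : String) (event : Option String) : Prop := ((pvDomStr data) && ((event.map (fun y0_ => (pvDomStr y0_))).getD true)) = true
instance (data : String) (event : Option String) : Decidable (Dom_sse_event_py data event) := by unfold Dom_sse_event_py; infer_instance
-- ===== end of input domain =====

-- B replaces A's split-into-lines/join strategy with a single character-level scan that emits the "data: " prefix inline after each newline; objective: alternative.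


-- ===== PORT A =====
-- Literal port of A: build a list of lines (optional event line, one "data: "-prefixed
-- line per split("\n") piece, two trailing empties) and join with "\n".
-- data.split("\n") has a nonempty literal separator, so Str.split? is always `some`.
def sse_event_py (data : String) (event : Option String) : String :=
  let lines : List String := []
  let lines : List String :=
    match event with
    | some e => if e ≠ "" then lines ++ ["event: " ++ e] else lines
    | none => lines
  let lines : List String :=
    ((PySem.Str.split? data "\n").getD []).foldl (fun acc line => acc ++ ["data: " ++ line]) lines
  let lines := lines ++ [""]
  let lines := lines ++ [""]
  PySem.Str.join "\n" lines

-- ===== PORT B =====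
-- Port of B: accumulate output pieces; one pass over data's CHARACTERS, appending each
-- character and, right after a newline, the "data: " prefix; finally "".join.
def sse_event_py_alt (data : String) (event : Option String) : String :=
  let out : List String := []
  let out : List String :=
    match event with
    | some e => if e ≠ "" then out ++ ["event: ", e, "\n"] else out
    | none => out
  let out := out ++ ["data: "]
  let out := data.toList.foldl (fun acc ch =>
      let acc := acc ++ [String.ofList [ch]]
      if ch = '\n' then acc ++ ["data: "] else acc) out
  let out := out ++ ["\n\n"]
  PySem.Str.join "" out

-- ===== PRECONDITION & SPEC =====
def Spec_sse_event_py (data : String) (event : Option String) (out : String) : Prop := out = sse_event_py_alt data event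
instance (data : String) (event : Option String) (out : String) : Decidable (Spec_sse_event_py data event out) := by unfold Spec_sse_event_py; infer_instance

-- ===== CLAIM (what is proved, stated in full; the proofs are below) =====
def Claim_equal_sse_event_py : Prop := ∀ (data : String) (event : Option String), Dom_sse_event_py data event → Spec_sse_event_py data event (sse_event_py data event)

-- ===== LEMMAS AND PROOFS =====

-- the line decomposition of a char list at '\n' (matches Python's split("\n"))
def pvParts : List Char → List (List Char)
  | [] => [[]]
  | c :: t => if c = '\n' then [] :: pvParts t else (pvParts t).modifyHead (c :: ·)

theorem pvParts_ne_nil (l : List Char) : pvParts l ≠ [] := by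
  induction l with
  | nil => simp [pvParts]
  | cons c t ih =>
    simp only [pvParts]
    split
    · simp
    · cases h : pvParts t with
      | nil => exact absurd h ih
      | cons p ps => simp [List.modifyHead]

theorem modifyHead_modifyHead' {α : Type} (f g : α → α) (l : List α) :
    (l.modifyHead g).modifyHead f = l.modifyHead (f ∘ g) := by
  cases l <;> simp [List.modifyHead]

theorem splitOn_go_eq (fuel : Nat) :
    ∀ (l cur : List Char) (acc : List (List Char)), l.length ≤ fuel →
      PySem.Chars.splitOn.go ['\n'] fuel l cur acc =
        acc.reverse ++ ((pvParts l).modifyHead (cur.reverse ++ ·)) := by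
  induction fuel with
  | zero =>
    intro l cur acc h
    have hl : l = [] := List.eq_nil_of_length_eq_zero (Nat.le_zero.mp h)
    subst hl
    simp [PySem.Chars.splitOn.go, pvParts]
  | succ f ih =>
    intro l cur acc h
    cases l with
    | nil => simp [PySem.Chars.splitOn.go, pvParts]
    | cons c t =>
      rw [PySem.Chars.splitOn.go]
      by_cases hc : c = '\n'
      · subst hc
        rw [if_pos (by simp [List.isPrefixOf])]
        rw [show List.drop (['\n'].length) ('\n' :: t) = t from rfl]
        rw [ih t [] (cur.reverse :: acc) (by simp at h; omega)]
        simp [pvParts, List.modifyHead]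
        cases hp : pvParts t with
        | nil => exact absurd hp (pvParts_ne_nil t)
        | cons p ps => simp
      · rw [if_neg (by simp [List.isPrefixOf]; exact fun h => hc h.symm)]
        rw [ih t (c :: cur) acc (by simp at h; omega)]
        simp only [pvParts, if_neg hc, modifyHead_modifyHead']
        cases hp : pvParts t with
        | nil => exact absurd hp (pvParts_ne_nil t)
        | cons p ps => simp [List.modifyHead]

theorem splitOn_eq_pvParts (s : List Char) :
    PySem.Chars.splitOn s ['\n'] = pvParts s := by
  rw [PySem.Chars.splitOn, splitOn_go_eq (s.length + 1) s [] [] (by omega)]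
  cases hp : pvParts s with
  | nil => exact absurd hp (pvParts_ne_nil s)
  | cons p ps => simp [List.modifyHead]

-- A-side core: joining the "data: "-prefixed lines plus two empties with "\n"
theorem join_map_data (ps : List (List Char)) (hne : ps ≠ []) :
    PySem.Chars.join ['\n'] (ps.map (fun l => "data: ".toList ++ l) ++ [[], []]) =
      "data: ".toList ++ PySem.Chars.join ("\ndata: ".toList) ps ++ ['\n', '\n'] := by
  induction ps with
  | nil => exact absurd rfl hne
  | cons p ps ih =>
    cases ps with
    | nil =>
      simp [PySem.Chars.join_cons_cons, PySem.Chars.join_singleton]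
    | cons q qs =>
      have hih := ih (by simp)
      simp only [List.map_cons, List.cons_append] at hih ⊢
      rw [PySem.Chars.join_cons_cons, hih, PySem.Chars.join_cons_cons]
      rw [show ("\ndata: ".toList) = '\n' :: "data: ".toList from by decide]
      simp

theorem foldl_append_map {α β : Type} (f : α → β) (xs : List α) (acc : List β) :
    xs.foldl (fun a x => a ++ [f x]) acc = acc ++ xs.map f := by
  induction xs generalizing acc with
  | nil => simp
  | cons x xs ih => simp [List.foldl, ih]

-- B-side: the string pieces emitted by the character loop on l
def pvPieces : List Char → List String
  | [] => []
  | c :: t => (if c = '\n' then [String.ofList [c], "data: "] else [String.ofList [c]]) ++ pvPieces t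

theorem foldl_pieces (l : List Char) (acc : List String) :
    l.foldl (fun acc ch =>
        let acc := acc ++ [String.ofList [ch]]
        if ch = '\n' then acc ++ ["data: "] else acc) acc = acc ++ pvPieces l := by
  induction l generalizing acc with
  | nil => simp [pvPieces]
  | cons c t ih =>
    simp only [List.foldl, pvPieces, ih]
    by_cases hc : c = '\n' <;> simp [hc]

theorem join_empty_flatten (xs : List (List Char)) :
    PySem.Chars.join [] xs = xs.flatten := by
  induction xs with
  | nil => simp [PySem.Chars.join_nil]
  | cons p ps ih =>
    cases ps with
    | nil => simp [PySem.Chars.join_singleton]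
    | cons q qs => rw [PySem.Chars.join_cons_cons]; simp_all

-- the flattened emitted pieces are exactly the "\ndata: "-join of the line decomposition
theorem pieces_eq_join (l : List Char) :
    ((pvPieces l).map String.toList).flatten =
      PySem.Chars.join ("\ndata: ".toList) (pvParts l) := by
  induction l with
  | nil => simp [pvPieces, pvParts, PySem.Chars.join_singleton]
  | cons c t ih =>
    cases hp : pvParts t with
    | nil => exact absurd hp (pvParts_ne_nil t)
    | cons p ps =>
      rw [hp] at ih
      by_cases hc : c = '\n'
      · subst hc
        have h1 : pvPieces ('\n' :: t) = String.ofList ['\n'] :: "data: " :: pvPieces t := by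
          simp [pvPieces]
        have h2 : pvParts ('\n' :: t) = [] :: p :: ps := by simp [pvParts, hp]
        rw [h1, h2, PySem.Chars.join_cons_cons]
        simp [ih, show ("\ndata: ".toList) = '\n' :: "data: ".toList from by decide]
      · have h1 : pvPieces (c :: t) = String.ofList [c] :: pvPieces t := by
          simp [pvPieces, hc]
        have h2 : pvParts (c :: t) = (c :: p) :: ps := by
          simp [pvParts, hc, hp, List.modifyHead]
        rw [h1, h2]
        cases ps with
        | nil =>
          simp only [PySem.Chars.join_singleton] at *
          simp [ih]
        | cons q qs =>
          rw [PySem.Chars.join_cons_cons]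
          rw [PySem.Chars.join_cons_cons] at ih
          simp [ih]

theorem str_ext (a b : String) (h : a.toList = b.toList) : a = b := by
  have := congrArg String.ofList h
  simpa using this

theorem main_eq (data : String) (event : Option String) :
    sse_event_py data event = sse_event_py_alt data event := by
  unfold sse_event_py sse_event_py_alt
  have hsplit : PySem.Str.split? data "\n" = some ((pvParts data.toList).map String.ofList) := by
    simp [PySem.Str.split?, PySem.Chars.split?, splitOn_eq_pvParts]
  rw [hsplit]
  apply str_ext
  simp only [Option.getD_some, foldl_append_map, foldl_pieces]
  rw [PySem.Str.toList_join, PySem.Str.toList_join]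
  rw [show ("".toList : List Char) = [] from by decide, join_empty_flatten]
  rw [show ("\n".toList) = ['\n'] from by decide]
  cases hp : pvParts data.toList with
  | nil => exact absurd hp (pvParts_ne_nil _)
  | cons p ps =>
    have key := join_map_data (p :: ps) (by simp)
    have hmap : (String.toList ∘ HAppend.hAppend "data: " ∘ String.ofList) =
        (fun l : List Char => "data: ".toList ++ l) := funext fun l => by simp [Function.comp]
    have hB : ((pvPieces data.toList).map String.toList).flatten =
        PySem.Chars.join ("\ndata: ".toList) (p :: ps) := by
      rw [pieces_eq_join, hp]
    cases event with
    | none =>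
      simp only [List.map_append, List.map_map, hmap, List.map_cons, List.map_nil,
        List.flatten_append, hB, List.nil_append]
      simpa [show ("\n\n".toList) = ['\n','\n'] from by decide] using key
    | some e =>
      by_cases he : e = ""
      · subst he
        simp only [ne_eq, not_true_eq_false,
          List.map_append, List.map_map, hmap, List.map_cons, List.map_nil,
          List.flatten_append, hB, List.nil_append]
        simpa [show ("\n\n".toList) = ['\n','\n'] from by decide] using key
      · simp only [ne_eq, he, not_false_eq_true, if_true, List.nil_append, List.map_append,
          List.map_map, hmap, List.map_cons, List.map_nil, List.flatten_append, List.flatten_cons,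
          List.flatten_nil, hB, String.toList_append]
        simp only [List.map_cons, List.cons_append] at key
        simp only [List.nil_append, List.cons_append, List.append_assoc, String.toList_ofList,
          show ("".toList : List Char) = [] from by decide]
        rw [PySem.Chars.join_cons_cons]
        simpa [show ("\n\n".toList) = ['\n','\n'] from by decide,
          show ("\n".toList) = ['\n'] from by decide] using key

-- ===== VERDICT (by name: the statement is the Claim_ definition above) =====
theorem sse_event_py_spec : Claim_equal_sse_event_py := by
  intro data event _
  unfold Spec_sse_event_py
  exact main_eq data event
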